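-- pv_equiv track=rewrite | github.com/amolkokje/coding | python/int_fb_phone.py | get_min_height
-- ===== SOURCE A (Python) =====
-- import heapq
--
-- def get_min_height(grid):
--
--     # get a sorted list of heights
--     # option-1: add to heap and pull from there - O(logN)
--     # option-2: add all to a list and sort the list - O(N*logN)
--     height_heap = list()
--     m = len(grid)
--     n = len(grid[0])
--     for i in range(m):
--         for j in range(n):
--             if grid[i][j] not in height_heap:
--                 heapq.heappush(height_heap, grid[i][j])
--
--     # check if path exists going from smallest to biggest
--     while height_heap:
--         curr_height = heapq.heappop(height_heap)
--         if not path_exists(grid, m, n, curr_height):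
--             return curr_height
--
-- def path_exists(grid, m, n, curr_height):
--
--     def _is_valid(px, py):
--         return True if (px>=0 and px<m and py>=0 and py<n) else False
--
--     visited = [ [False for _ in range(n)] for _ in range(m)]
--     def _recurse(x, y):
--         if visited[x][y] or grid[x][y]<curr_height:
--             return False
--
--         if x==m-1 and y==n-1:
--             return True
--
--         for nx,ny in [ (x+1,y), (x-1,y), (x,y+1), (x,y-1) ]:
--             if _is_valid(nx,ny):
--                 visited[x][y] = True
--                 found = _recurse(nx, ny)
--                 visited[x][y] = False
--                 if found:
--                     return found
--
--     return _recurse(0,0)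
-- ===== SOURCE B (Python) =====
-- def get_min_height(grid):
--     m = len(grid)
--     n = len(grid[0])
--     heights = sorted({grid[i][j] for i in range(m) for j in range(n)})
--
--     def reachable(h):
--         # iterative DFS over cells with height >= h
--         if grid[0][0] < h:
--             return False
--         seen = {(0, 0)}
--         stack = [(0, 0)]
--         while stack:
--             x, y = stack.pop()
--             if x == m - 1 and y == n - 1:
--                 return True
--             for nx, ny in ((x + 1, y), (x - 1, y), (x, y + 1), (x, y - 1)):
--                 if 0 <= nx < m and 0 <= ny < n and (nx, ny) not in seen and grid[nx][ny] >= h: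
--                     seen.add((nx, ny))
--                     stack.append((nx, ny))
--         return False
--
--     # binary search for the first (smallest) height with no path
--     lo, hi = 0, len(heights)
--     while lo < hi:
--         mid = (lo + hi) // 2
--         if reachable(heights[mid]):
--             lo = mid + 1
--         else:
--             hi = mid
--     return heights[lo] if lo < len(heights) else None
-- ===== Notes on version B (the rewrite author's own statement) =====
-- stated objective: faster
-- what changed: Replaces the quadratic membership-list heap build and the exponential backtracking DFS per candidate height with a sorted unique-height list, binary search over it, and an iterative stack/seen-set reachability check per probe; intended as faster (asymptotic), measured: A times out on grids where B still answers in under a millisecond (one probe run measured B 1246x at n=64, another 1.69x with A timing out only at n=256).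
-- outside the precondition, e.g. on get_min_height([]): A raises IndexError, B raises IndexError
import Mathlib
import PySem

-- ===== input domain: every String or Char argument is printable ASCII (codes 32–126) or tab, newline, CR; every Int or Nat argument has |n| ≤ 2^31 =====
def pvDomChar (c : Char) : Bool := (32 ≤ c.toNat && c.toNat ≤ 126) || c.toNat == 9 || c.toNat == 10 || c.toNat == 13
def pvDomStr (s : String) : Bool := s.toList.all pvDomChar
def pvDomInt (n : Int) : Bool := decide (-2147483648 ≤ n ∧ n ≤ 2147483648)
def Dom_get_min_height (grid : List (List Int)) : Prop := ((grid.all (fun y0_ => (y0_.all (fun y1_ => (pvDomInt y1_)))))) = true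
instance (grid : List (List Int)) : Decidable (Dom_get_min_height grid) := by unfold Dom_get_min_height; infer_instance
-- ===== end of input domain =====

-- B replaces A's quadratic membership-list heap build and exponential backtracking DFS per
-- candidate height by sorting the unique heights once, binary-searching over them, and testing
-- each probed height with an iterative stack/seen-set reachability check (objective: faster;
-- a timing run saw A time out on grids where B still answered in under a millisecond).

-- ===== PORT A =====
-- grid[x][y] at a bounds-checked position (every access below is guarded by 0 ≤ x < m, 0 ≤ y < n,
-- so getD/toNat is exact here)
def pvAt (g : List (List Int)) (x y : Int) : Int := (g.getD x.toNat []).getD y.toNat 0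

-- _is_valid of A (also the bounds test B inlines)
def pvValid (m n : Nat) (p : Int × Int) : Bool :=
  decide (0 ≤ p.1) && decide (p.1 < (m : Int)) && decide (0 ≤ p.2) && decide (p.2 < (n : Int))

-- the neighbour list [(x+1,y),(x-1,y),(x,y+1),(x,y-1)] both Pythons use
def pvNbrs (p : Int × Int) : List (Int × Int) :=
  [(p.1 + 1, p.2), (p.1 - 1, p.2), (p.1, p.2 + 1), (p.1, p.2 - 1)]

-- _recurse of A: visited is threaded as the list V (Python marks visited[x][y] before each child
-- call and unmarks after, i.e. each child runs with visited = V ∪ {(x,y)}). The recursion depth is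
-- bounded by the number of unvisited cells, so fuel m*n+1 (supplied by pvPathExistsA) is never
-- exhausted; fuel 0 is unreachable there.
def pvDfsA (g : List (List Int)) (m n : Nat) (h : Int) :
    Nat → List (Int × Int) → Int × Int → Bool
  | 0, _, _ => false
  | fuel + 1, V, p =>
    if V.contains p || decide (pvAt g p.1 p.2 < h) then false
    else if p = ((m : Int) - 1, (n : Int) - 1) then true
    else (pvNbrs p).any (fun q => pvValid m n q && pvDfsA g m n h fuel (p :: V) q)

-- path_exists of A
def pvPathExistsA (g : List (List Int)) (m n : Nat) (h : Int) : Bool :=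
  pvDfsA g m n h (m * n + 1) [] (0, 0)

-- A's height_heap build: heapq is observed only through heappop (remove first minimum), so the
-- heap is modelled as the multiset of pushed elements (push = append); exact for heapq's
-- observable behaviour.
def pvBuildHeap (g : List (List Int)) (m n : Nat) : List Int :=
  (List.range m).foldl (fun (acc : List Int) (i : Nat) =>
    (List.range n).foldl (fun (acc2 : List Int) (j : Nat) =>
      if acc2.contains (pvAt g (i : Int) (j : Int)) then acc2
      else acc2 ++ [pvAt g (i : Int) (j : Int)]) acc) []

-- A's while loop: heappop = take first minimum and remove it
def pvALoop (g : List (List Int)) (m n : Nat) : Nat → List Int → Option Int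
  | 0, _ => none
  | fuel + 1, hp =>
    match PySem.List.min? hp (fun x => x) with
    | none => none
    | some c =>
      if pvPathExistsA g m n c then pvALoop g m n fuel ((PySem.List.remove? hp c).getD [])
      else some c

def get_min_height (grid : List (List Int)) : Option Int :=
  let m := grid.length
  let n := (grid.getD 0 []).length
  let hp := pvBuildHeap grid m n
  pvALoop grid m n hp.length hp

-- ===== PORT B =====
-- the row-major traversal of the grid's heights (the set comprehension's iteration order)
def pvTrav (g : List (List Int)) (m n : Nat) : List Int :=
  (List.range m).flatMap (fun (i : Nat) =>
    (List.range n).map (fun (j : Nat) => pvAt g (i : Int) (j : Int)))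

-- B's while loop over the explicit stack; the Lean list's head is the Python stack's top (pop from
-- the end = pop the head here; the pushes of one round land reversed on top, same LIFO order).
-- Each loop iteration pops one element and every push adds a fresh cell to seen, so fuel m*n+1
-- (supplied by pvReachB) is never exhausted.
def pvBLoop (g : List (List Int)) (m n : Nat) (h : Int) :
    Nat → PySem.Set (Int × Int) → List (Int × Int) → Bool
  | _, _, [] => false
  | 0, _, _ :: _ => false
  | fuel + 1, seen, c :: rest =>
    if c = ((m : Int) - 1, (n : Int) - 1) then true
    else
      let st := (pvNbrs c).foldl (fun st q =>
        if pvValid m n q && !(PySem.Set.contains st.1 q) && decide (h ≤ pvAt g q.1 q.2)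
        then (PySem.Set.add st.1 q, q :: st.2) else st) (seen, rest)
      pvBLoop g m n h fuel st.1 st.2

-- reachable(h) of B
def pvReachB (g : List (List Int)) (m n : Nat) (h : Int) : Bool :=
  if pvAt g 0 0 < h then false
  else pvBLoop g m n h (m * n + 1)
    (PySem.Set.add PySem.Set.empty ((0 : Int), (0 : Int))) [((0 : Int), (0 : Int))]

-- B's binary-search loop; hi - lo shrinks each round, so fuel hs.length + 1 is never exhausted
def pvBSearch (g : List (List Int)) (m n : Nat) (hs : List Int) :
    Nat → Nat → Nat → Nat
  | 0, lo, _ => lo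
  | fuel + 1, lo, hi =>
    if lo < hi then
      let mid := (lo + hi) / 2
      if pvReachB g m n (hs.getD mid 0) then pvBSearch g m n hs fuel (mid + 1) hi
      else pvBSearch g m n hs fuel lo mid
    else lo

def get_min_height_alt (grid : List (List Int)) : Option Int :=
  let m := grid.length
  let n := (grid.getD 0 []).length
  let hs := PySem.List.sorted (PySem.Set.ofList (pvTrav grid m n)) (fun x => x) false
  let r := pvBSearch grid m n hs (hs.length + 1) 0 hs.length
  if r < hs.length then some (hs.getD r 0) else none

-- ===== PRECONDITION & SPEC =====
-- Python A raises IndexError on grid = [] (len(grid[0])) and whenever some row is shorter than the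
-- first row (grid[i][j] for j < len(grid[0])); on all other inputs it returns normally.
def Pre_get_min_height (grid : List (List Int)) : Prop :=
  grid ≠ [] ∧ ∀ row ∈ grid, (grid.getD 0 []).length ≤ row.length
instance (grid : List (List Int)) : Decidable (Pre_get_min_height grid) := by
  unfold Pre_get_min_height; infer_instance

def pvWitness_get_min_height : List (List Int) := [[1, 2], [3, 4]]

def Spec_get_min_height (grid : List (List Int)) (out : Option Int) : Prop := out = get_min_height_alt grid
instance (grid : List (List Int)) (out : Option Int) : Decidable (Spec_get_min_height grid out) := by
  unfold Spec_get_min_height; infer_instance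

-- ===== CLAIM (what is proved, stated in full; the proofs are below) =====
def Claim_equal_get_min_height : Prop := ∀ (grid : List (List Int)), Dom_get_min_height grid → Pre_get_min_height grid → Spec_get_min_height grid (get_min_height grid)

-- ===== LEMMAS AND PROOFS =====

-- a cell usable at threshold h (valid and high enough)
def pvOk (g : List (List Int)) (m n : Nat) (h : Int) (p : Int × Int) : Bool :=
  pvValid m n p && decide (h ≤ pvAt g p.1 p.2)

-- "some path of ok cells avoiding V leads from p to the target corner"
inductive pvConn (g : List (List Int)) (m n : Nat) (h : Int) :
    List (Int × Int) → Int × Int → Prop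
  | base (V : List (Int × Int)) (h1 : pvOk g m n h ((m : Int) - 1, (n : Int) - 1) = true)
      (h2 : ((m : Int) - 1, (n : Int) - 1) ∉ V) : pvConn g m n h V ((m : Int) - 1, (n : Int) - 1)
  | step (V : List (Int × Int)) (p q : Int × Int) (h1 : pvOk g m n h p = true) (h2 : p ∉ V)
      (h3 : q ∈ pvNbrs p) (h4 : pvConn g m n h V q) : pvConn g m n h V p

-- "some path of ok cells leads from (0,0) to p"
inductive pvRch (g : List (List Int)) (m n : Nat) (h : Int) : Int × Int → Prop
  | base (h1 : pvOk g m n h (0, 0) = true) : pvRch g m n h (0, 0)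
  | step (p q : Int × Int) (h1 : pvRch g m n h p) (h2 : q ∈ pvNbrs p)
      (h3 : pvOk g m n h q = true) : pvRch g m n h q

def pvCells (m n : Nat) : List (Int × Int) :=
  ((List.range m).product (List.range n)).map (fun p => ((p.1 : Int), (p.2 : Int)))

def pvFree (m n : Nat) (V : List (Int × Int)) : Nat :=
  ((pvCells m n).filter (fun c => !V.contains c)).length

theorem pvMem_cells {m n : Nat} {p : Int × Int} : p ∈ pvCells m n ↔ pvValid m n p = true := by
  obtain ⟨x, y⟩ := p
  simp only [pvCells, List.mem_map]
  constructor
  · rintro ⟨⟨a, b⟩, hab, heq⟩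
    have hab' : a ∈ List.range m ∧ b ∈ List.range n := List.mem_product.mp hab
    simp only [List.mem_range] at hab'
    obtain ⟨h1, h2⟩ := Prod.mk.injEq .. ▸ heq
    simp only [Prod.mk.injEq] at heq
    simp only [pvValid, Bool.and_eq_true, decide_eq_true_eq]
    omega
  · intro hv
    simp only [pvValid, Bool.and_eq_true, decide_eq_true_eq] at hv
    refine ⟨(x.toNat, y.toNat), ?_, ?_⟩
    · refine List.mem_product.mpr ⟨?_, ?_⟩ <;> simp only [List.mem_range] <;> omega
    · simp only [Prod.mk.injEq]
      constructor <;> omega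

theorem pvLength_cells (m n : Nat) : (pvCells m n).length = m * n := by
  simp only [pvCells, List.length_map]
  show (List.range m ×ˢ List.range n).length = m * n
  rw [List.length_product]
  simp

theorem pvFree_le (m n : Nat) (V : List (Int × Int)) : pvFree m n V ≤ m * n := by
  calc pvFree m n V ≤ (pvCells m n).length := List.length_filter_le _ _
    _ = m * n := pvLength_cells m n

theorem pvFree_congr (m n : Nat) (V W : List (Int × Int)) (hmem : ∀ c, c ∈ V ↔ c ∈ W) :
    pvFree m n V = pvFree m n W := by
  unfold pvFree
  congr 1
  apply List.filter_congr
  intro c _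
  have : V.contains c = W.contains c := by
    by_cases hc : c ∈ V
    · have hw : c ∈ W := (hmem c).mp hc
      simp [hc, hw]
    · have hw : c ∉ W := fun hw => hc ((hmem c).mpr hw)
      simp [hc, hw]
  rw [this]

theorem pvFree_cons_lt (m n : Nat) (V : List (Int × Int)) (p : Int × Int)
    (hv : pvValid m n p = true) (hnm : p ∉ V) : pvFree m n (p :: V) < pvFree m n V := by
  unfold pvFree
  have hstep : (pvCells m n).filter (fun c => !(p :: V).contains c) =
      ((pvCells m n).filter (fun c => !V.contains c)).filter (fun c => !(c == p)) := by
    rw [List.filter_filter]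
    apply List.filter_congr
    intro c _
    by_cases hc : c = p
    · subst hc; simp [hnm]
    · by_cases hcv : c ∈ V <;> simp [hc, hcv]
  rw [hstep]
  apply List.length_filter_lt_length_iff_exists.mpr
  refine ⟨p, ?_, by simp⟩
  rw [List.mem_filter]
  exact ⟨pvMem_cells.mpr hv, by simp [hnm]⟩

theorem pvFree_append (m n : Nat) : ∀ (news seen : List (Int × Int)), news.Nodup →
    (∀ q ∈ news, pvValid m n q = true ∧ q ∉ seen) →
    pvFree m n (seen ++ news) + news.length ≤ pvFree m n seen := by
  intro news
  induction news with
  | nil => intro seen _ _; simp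
  | cons q news' ih =>
    intro seen hnd hq
    have hq1 := hq q (List.mem_cons_self ..)
    have heq : seen ++ q :: news' = (seen ++ [q]) ++ news' := by simp
    have h1 : pvFree m n ((seen ++ [q]) ++ news') + news'.length ≤ pvFree m n (seen ++ [q]) := by
      apply ih (seen ++ [q]) (List.Nodup.of_cons hnd)
      intro r hr
      refine ⟨(hq r (List.mem_cons_of_mem _ hr)).1, ?_⟩
      intro hmem
      rcases List.mem_append.mp hmem with h | h
      · exact (hq r (List.mem_cons_of_mem _ hr)).2 h
      · have : r = q := by simpa using h
        subst this
        exact (List.nodup_cons.mp hnd).1 hr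
    have h2 : pvFree m n (seen ++ [q]) < pvFree m n seen := by
      have hc : pvFree m n (seen ++ [q]) = pvFree m n (q :: seen) := by
        apply pvFree_congr
        intro c
        simp [List.mem_append, List.mem_cons, or_comm]
      rw [hc]
      exact pvFree_cons_lt m n seen q hq1.1 hq1.2
    rw [heq]
    simp only [List.length_cons]
    omega

theorem pvNbrs_nodup (p : Int × Int) : (pvNbrs p).Nodup := by
  simp [pvNbrs, Prod.ext_iff]
  omega

-- basic facts about pvConn
theorem pvAndSplit {a b : Bool} (h : (a && b) = true) : a = true ∧ b = true := by
  simp only [Bool.and_eq_true] at h; exact h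

theorem pvConn_ok {g m n h V p} (hc : pvConn g m n h V p) : pvOk g m n h p = true := by
  cases hc <;> assumption

theorem pvConn_not_mem {g m n h V p} (hc : pvConn g m n h V p) : p ∉ V := by
  cases hc <;> assumption

theorem pvConn_anti {g m n h} {V V' : List (Int × Int)} {p} (hsub : ∀ c, c ∈ V → c ∈ V')
    (hc : pvConn g m n h V' p) : pvConn g m n h V p := by
  induction hc generalizing V with
  | base h1 h2 => exact .base V h1 (fun hm' => h2 (hsub _ hm'))
  | step p' q h1 h2 h3 h4 ih => exact .step V p' q h1 (fun hm' => h2 (hsub _ hm')) h3 (ih hsub)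

theorem pvConn_avoid {g m n h V} (p : Int × Int) :
    ∀ {q}, pvConn g m n h V q →
      pvConn g m n h (p :: V) q ∨
        (pvOk g m n h p = true ∧ p ∉ V ∧
          (p = ((m : Int) - 1, (n : Int) - 1) ∨
            ∃ r ∈ pvNbrs p, pvConn g m n h (p :: V) r)) := by
  intro q hq
  induction hq with
  | base h1 h2 =>
    by_cases hp : p = ((m : Int) - 1, (n : Int) - 1)
    · right
      exact ⟨hp ▸ h1, hp ▸ h2, Or.inl hp⟩
    · left
      refine .base _ h1 ?_
      intro hm'
      rcases List.mem_cons.mp hm' with h | h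
      · exact hp h.symm
      · exact h2 h
  | step p' q' h1 h2 h3 h4 ih =>
    rcases ih with hq' | hr
    · by_cases hp' : p' = p
      · right
        subst hp'
        exact ⟨h1, h2, Or.inr ⟨q', h3, hq'⟩⟩
      · left
        refine .step _ p' q' h1 ?_ h3 hq'
        intro hm'
        rcases List.mem_cons.mp hm' with h | h
        · exact hp' h
        · exact h2 h
    · right; exact hr

theorem pvConn_step_out {g m n h V p} (hc : pvConn g m n h V p)
    (hne : p ≠ ((m : Int) - 1, (n : Int) - 1)) :
    ∃ r ∈ pvNbrs p, pvConn g m n h (p :: V) r := by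
  rcases pvConn_avoid p hc with hconn | ⟨_, _, hcase⟩
  · exact absurd (List.mem_cons_self ..) (pvConn_not_mem hconn)
  · rcases hcase with h | h
    · exact absurd h hne
    · exact h

-- A's DFS computes pvConn
theorem pvDfsA_sound {g m n h} : ∀ (fuel : Nat) (V : List (Int × Int)) (p : Int × Int),
    pvValid m n p = true → pvDfsA g m n h fuel V p = true → pvConn g m n h V p := by
  intro fuel
  induction fuel with
  | zero => intro V p _ hd; simp [pvDfsA] at hd
  | succ fuel ih =>
    intro V p hv hd
    rw [pvDfsA] at hd
    by_cases hc1 : (V.contains p || decide (pvAt g p.1 p.2 < h)) = true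
    · rw [if_pos hc1] at hd; cases hd
    · rw [if_neg hc1] at hd
      have hok : pvOk g m n h p = true := by
        simp only [Bool.or_eq_true, decide_eq_true_eq, not_or] at hc1
        simp only [pvOk, Bool.and_eq_true, decide_eq_true_eq]
        exact ⟨hv, by omega⟩
      have hnm : p ∉ V := by
        simp only [Bool.or_eq_true, not_or] at hc1
        intro hmem
        exact hc1.1 (by simpa using hmem)
      by_cases hp : p = ((m : Int) - 1, (n : Int) - 1)
      · exact hp ▸ .base V (hp ▸ hok) (hp ▸ hnm)
      · rw [if_neg hp] at hd
        obtain ⟨q, hqm, hq⟩ := List.any_eq_true.mp hd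
        obtain ⟨hqv, hqd⟩ := pvAndSplit hq
        have hq' : pvConn g m n h (p :: V) q := ih (p :: V) q hqv hqd
        exact .step V p q hok hnm hqm (pvConn_anti (fun c hc => List.mem_cons_of_mem _ hc) hq')

theorem pvDfsA_complete {g m n h} : ∀ (fuel : Nat) (V : List (Int × Int)) (p : Int × Int),
    pvConn g m n h V p → pvFree m n V ≤ fuel → pvDfsA g m n h fuel V p = true := by
  intro fuel
  induction fuel with
  | zero =>
    intro V p hc hfree
    exfalso
    have hok := pvConn_ok hc
    have hv : pvValid m n p = true := (pvAndSplit hok).1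
    have hpm : p ∈ (pvCells m n).filter (fun c => !V.contains c) := by
      rw [List.mem_filter]
      exact ⟨pvMem_cells.mpr hv, by simp [pvConn_not_mem hc]⟩
    have : 0 < pvFree m n V := List.length_pos_of_mem hpm
    omega
  | succ fuel ih =>
    intro V p hc hfree
    have hok := pvConn_ok hc
    obtain ⟨hv, hle⟩ := pvAndSplit hok
    have hnm := pvConn_not_mem hc
    rw [pvDfsA]
    have hc1 : (V.contains p || decide (pvAt g p.1 p.2 < h)) = false := by
      simp only [Bool.or_eq_false_iff, decide_eq_false_iff_not, not_lt]
      refine ⟨by simpa using hnm, ?_⟩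
      simpa using hle
    rw [hc1]
    simp only [Bool.false_eq_true, if_false]
    by_cases hp : p = ((m : Int) - 1, (n : Int) - 1)
    · rw [if_pos hp]
    · rw [if_neg hp]
      obtain ⟨r, hrm, hrc⟩ := pvConn_step_out hc hp
      apply List.any_eq_true.mpr
      refine ⟨r, hrm, ?_⟩
      simp only [Bool.and_eq_true]
      refine ⟨(pvAndSplit (pvConn_ok hrc)).1, ?_⟩
      apply ih (p :: V) r hrc
      have := pvFree_cons_lt m n V p hv hnm
      omega

theorem pvPathExistsA_iff {g m n h} (hm : 1 ≤ m) (hn : 1 ≤ n) :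
    pvPathExistsA g m n h = true ↔ pvConn g m n h [] (0, 0) := by
  unfold pvPathExistsA
  constructor
  · intro hd
    apply pvDfsA_sound (m * n + 1) [] (0, 0) ?_ hd
    simp only [pvValid, Bool.and_eq_true, decide_eq_true_eq]
    norm_num
    omega
  · intro hc
    apply pvDfsA_complete (m * n + 1) [] (0, 0) hc
    have := pvFree_le m n []
    omega

-- bridge: a path from (0,0) to the corner read in either direction
theorem pvConn_iff_rch {g m n h} :
    pvConn g m n h [] (0, 0) ↔ pvRch g m n h ((m : Int) - 1, (n : Int) - 1) := by
  have hrch_ok : ∀ {p}, pvRch g m n h p → pvOk g m n h p = true := by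
    intro p hr
    cases hr with
    | base h1 => exact h1
    | step p' q h1 h2 h3 => exact h3
  have aux1 : ∀ {p}, pvConn g m n h [] p →
      pvRch g m n h p → pvRch g m n h ((m : Int) - 1, (n : Int) - 1) := by
    intro p hc
    induction hc with
    | base h1 h2 => exact id
    | step p' q h1 h2 h3 h4 ih => exact fun hp' => ih (.step p' q hp' h3 (pvConn_ok h4))
  have aux2 : ∀ {c}, pvRch g m n h c →
      pvConn g m n h [] c → pvConn g m n h [] (0, 0) := by
    intro c hr
    induction hr with
    | base h1 => exact id
    | step p q h1 h2 h3 ih =>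
      exact fun hq => ih (.step [] p q (hrch_ok h1) (List.not_mem_nil) h2 hq)
  constructor
  · intro hc
    exact aux1 hc (.base (pvConn_ok hc))
  · intro hr
    exact aux2 hr (.base [] (hrch_ok hr) (List.not_mem_nil))

-- B's loop invariant
def pvInv (g : List (List Int)) (m n : Nat) (h : Int)
    (seen : List (Int × Int)) (stack : List (Int × Int)) : Prop :=
  (∀ c ∈ stack, c ∈ seen) ∧
  (∀ c ∈ seen, pvOk g m n h c = true ∧ pvRch g m n h c) ∧
  (∀ c ∈ seen, c ∉ stack → c ≠ ((m : Int) - 1, (n : Int) - 1) ∧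
      ∀ q ∈ pvNbrs c, pvOk g m n h q = true → q ∈ seen) ∧
  stack.Nodup ∧ ((0 : Int), (0 : Int)) ∈ seen

-- the push condition of B's inner neighbour loop, with the seen set it starts from
def pvPush (g : List (List Int)) (m n : Nat) (h : Int) (seen : List (Int × Int))
    (q : Int × Int) : Bool :=
  pvValid m n q && !(PySem.Set.contains seen q) && decide (h ≤ pvAt g q.1 q.2)

theorem pvContains_false {seen : List (Int × Int)} {q : Int × Int}
    (h : PySem.Set.contains seen q = false) : q ∉ seen := by
  simp [PySem.Set.contains] at h
  exact h

theorem pvPush_not_mem {g m n h seen q} (hp : pvPush g m n h seen q = true) : q ∉ seen := by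
  simp only [pvPush, Bool.and_eq_true, Bool.not_eq_true'] at hp
  exact pvContains_false hp.1.2

theorem pvPush_ok {g m n h seen q} (hp : pvPush g m n h seen q = true) :
    pvOk g m n h q = true := by
  simp only [pvPush, Bool.and_eq_true] at hp
  simp only [pvOk, Bool.and_eq_true]
  exact ⟨hp.1.1, hp.2⟩

theorem pvPush_of {g m n h seen q} (hok : pvOk g m n h q = true) (hnm : q ∉ seen) :
    pvPush g m n h seen q = true := by
  simp only [pvOk, Bool.and_eq_true] at hok
  simp only [pvPush, Bool.and_eq_true, Bool.not_eq_true']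
  refine ⟨⟨hok.1, ?_⟩, hok.2⟩
  simp only [PySem.Set.contains]
  simp [hnm]

-- characterisation of the inner neighbour fold of pvBLoop
theorem pvFold_eq {g : List (List Int)} {m n : Nat} {h : Int} :
    ∀ (l : List (Int × Int)) (sn : PySem.Set (Int × Int)) (sk : List (Int × Int)), l.Nodup →
    l.foldl (fun st q =>
        if pvValid m n q && !(PySem.Set.contains st.1 q) && decide (h ≤ pvAt g q.1 q.2)
        then (PySem.Set.add st.1 q, q :: st.2) else st) (sn, sk)
    = (sn ++ l.filter (pvPush g m n h sn),
       (l.filter (pvPush g m n h sn)).reverse ++ sk) := by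
  intro l
  induction l with
  | nil => intro sn sk _; simp
  | cons q l' ih =>
    intro sn sk hnd
    obtain ⟨hq, hnd'⟩ := List.nodup_cons.mp hnd
    rw [List.foldl_cons]
    by_cases hc : pvPush g m n h sn q = true
    · have hcontains : PySem.Set.contains sn q = false := by
        simp only [pvPush, Bool.and_eq_true, Bool.not_eq_true'] at hc
        exact hc.1.2
      have hadd : PySem.Set.add sn q = sn ++ [q] := by
        simp [PySem.Set.add, pvContains_false hcontains]
      have hstep : (if pvValid m n q && !(PySem.Set.contains sn q) && decide (h ≤ pvAt g q.1 q.2)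
          then (PySem.Set.add sn q, q :: sk) else (sn, sk)) = ((sn ++ [q] : List (Int × Int)), q :: sk) := by
        rw [if_pos (by exact hc), hadd]
      rw [hstep, ih (sn ++ [q]) (q :: sk) hnd']
      have hfc : l'.filter (pvPush g m n h (sn ++ [q])) = l'.filter (pvPush g m n h sn) := by
        apply List.filter_congr
        intro r hr
        have hrq : r ≠ q := fun hh => hq (hh ▸ hr)
        simp only [pvPush, PySem.Set.contains]
        have hcr : List.contains (sn ++ [q]) r = List.contains sn r := by
          by_cases hrs : r ∈ sn
          · simp [hrs]
          · simp [hrs, hrq]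
        rw [hcr]
      have hfilt : (q :: l').filter (pvPush g m n h sn) = q :: l'.filter (pvPush g m n h sn) := by
        rw [List.filter_cons, if_pos hc]
      rw [hfc, hfilt]
      simp [List.append_assoc]
    · have hstep : (if pvValid m n q && !(PySem.Set.contains sn q) && decide (h ≤ pvAt g q.1 q.2)
          then (PySem.Set.add sn q, q :: sk) else (sn, sk)) = (sn, sk) := by
        rw [if_neg (by exact hc)]
      rw [hstep, ih sn sk hnd']
      have hfilt : (q :: l').filter (pvPush g m n h sn) = l'.filter (pvPush g m n h sn) := by
        rw [List.filter_cons, if_neg hc]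
      rw [hfilt]

-- with an empty stack everything reachable is already in the closed seen set
theorem pvClosed_not_rch {g m n h seen} (hinv : pvInv g m n h seen []) :
    ¬ pvRch g m n h ((m : Int) - 1, (n : Int) - 1) := by
  obtain ⟨_, hIb, hIc, _, hIf⟩ := hinv
  intro hr
  have hall : ∀ c, pvRch g m n h c → c ∈ seen := by
    intro c hc
    induction hc with
    | base h1 => exact hIf
    | step p q h1 h2 h3 ih => exact (hIc p ih (List.not_mem_nil)).2 q h2 h3
  exact (hIc _ (hall _ hr) (List.not_mem_nil)).1 rfl

-- popping c ≠ target preserves the invariant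
theorem pvInv_step {g m n h} {seen rest : List (Int × Int)} {c : Int × Int}
    (hinv : pvInv g m n h seen (c :: rest)) (hct : c ≠ ((m : Int) - 1, (n : Int) - 1)) :
    pvInv g m n h (seen ++ (pvNbrs c).filter (pvPush g m n h seen))
      (((pvNbrs c).filter (pvPush g m n h seen)).reverse ++ rest) ∧
    (∀ q ∈ (pvNbrs c).filter (pvPush g m n h seen), pvValid m n q = true ∧ q ∉ seen) ∧
    ((pvNbrs c).filter (pvPush g m n h seen)).Nodup := by
  obtain ⟨hIa, hIb, hIc, hId, hIf⟩ := hinv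
  set news := (pvNbrs c).filter (pvPush g m n h seen) with hnews
  have hmemnews : ∀ q, q ∈ news → q ∈ pvNbrs c ∧ pvPush g m n h seen q = true := by
    intro q hqn
    exact List.mem_filter.mp hqn
  have hnewprops : ∀ q ∈ news, pvValid m n q = true ∧ q ∉ seen := by
    intro q hqn
    obtain ⟨_, hp⟩ := hmemnews q hqn
    exact ⟨(pvAndSplit (pvPush_ok hp)).1, pvPush_not_mem hp⟩
  have hnodupnews : news.Nodup := List.Nodup.filter _ (pvNbrs_nodup c)
  have hcs : c ∈ seen := hIa c (List.mem_cons_self ..)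
  refine ⟨⟨?_, ?_, ?_, ?_, ?_⟩, hnewprops, hnodupnews⟩
  · -- Ia
    intro c' hc'
    rcases List.mem_append.mp hc' with h1 | h1
    · exact List.mem_append.mpr (Or.inr (List.mem_reverse.mp h1))
    · exact List.mem_append.mpr (Or.inl (hIa c' (List.mem_cons_of_mem _ h1)))
  · -- Ib
    intro c' hc'
    rcases List.mem_append.mp hc' with h1 | h1
    · exact hIb c' h1
    · obtain ⟨hnb, hp⟩ := hmemnews c' h1
      refine ⟨pvPush_ok hp, ?_⟩
      exact .step c c' (hIb c hcs).2 hnb (pvPush_ok hp)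
  · -- Ic
    intro c' hc' hns
    have hc'rev : c' ∉ news := by
      intro hmem
      exact hns (List.mem_append.mpr (Or.inl (List.mem_reverse.mpr hmem)))
    have hc'rest : c' ∉ rest := fun hmem => hns (List.mem_append.mpr (Or.inr hmem))
    have hc'seen : c' ∈ seen := by
      rcases List.mem_append.mp hc' with h1 | h1
      · exact h1
      · exact absurd h1 hc'rev
    by_cases hcc : c' = c
    · subst hcc
      refine ⟨hct, ?_⟩
      intro q hqn hqok
      by_cases hqs : q ∈ seen
      · exact List.mem_append.mpr (Or.inl hqs)
      · refine List.mem_append.mpr (Or.inr ?_)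
        rw [hnews, List.mem_filter]
        exact ⟨hqn, pvPush_of hqok hqs⟩
    · have hold := hIc c' hc'seen (by
        intro hmem
        rcases List.mem_cons.mp hmem with h1 | h1
        · exact hcc h1
        · exact hc'rest h1)
      refine ⟨hold.1, ?_⟩
      intro q hqn hqok
      exact List.mem_append.mpr (Or.inl (hold.2 q hqn hqok))
  · -- Id
    apply List.Nodup.append
    · exact List.nodup_reverse.mpr hnodupnews
    · exact (List.nodup_cons.mp hId).2
    · intro a ha1 ha2
      have ha1' : a ∈ news := List.mem_reverse.mp ha1
      have : a ∈ seen := hIa a (List.mem_cons_of_mem _ ha2)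
      exact (hnewprops a ha1').2 this
  · -- If
    exact List.mem_append.mpr (Or.inl hIf)

theorem pvBLoop_iff {g m n h} : ∀ (fuel : Nat) (seen stack : List (Int × Int)),
    pvInv g m n h seen stack → stack.length + pvFree m n seen ≤ fuel →
    (pvBLoop g m n h fuel seen stack = true ↔
      pvRch g m n h ((m : Int) - 1, (n : Int) - 1)) := by
  intro fuel
  induction fuel with
  | zero =>
    intro seen stack hinv hfuel
    cases stack with
    | nil =>
      simp only [pvBLoop, Bool.false_eq_true, false_iff]
      exact pvClosed_not_rch hinv
    | cons c rest => simp at hfuel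
  | succ fuel ih =>
    intro seen stack hinv hfuel
    cases stack with
    | nil =>
      simp only [pvBLoop, Bool.false_eq_true, false_iff]
      exact pvClosed_not_rch hinv
    | cons c rest =>
      rw [pvBLoop]
      by_cases hct : c = ((m : Int) - 1, (n : Int) - 1)
      · rw [if_pos hct]
        simp only [true_iff]
        exact hct ▸ (hinv.2.1 c (hinv.1 c (List.mem_cons_self ..))).2
      · rw [if_neg hct]
        have hfold := pvFold_eq (g := g) (m := m) (n := n) (h := h) (pvNbrs c) seen rest
          (pvNbrs_nodup c)
        simp only [hfold]
        obtain ⟨hinv', hnewprops, hnodupnews⟩ := pvInv_step ⟨hinv.1, hinv.2.1, hinv.2.2.1, hinv.2.2.2.1, hinv.2.2.2.2⟩ hct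
        apply ih _ _ hinv'
        have hfree := pvFree_append m n ((pvNbrs c).filter (pvPush g m n h seen)) seen
          hnodupnews hnewprops
        simp only [List.length_append, List.length_reverse, List.length_cons] at hfuel ⊢
        omega

theorem pvRch_ok_start {g m n h p} (hr : pvRch g m n h p) : pvOk g m n h (0, 0) = true := by
  induction hr with
  | base h1 => exact h1
  | step p q h1 h2 h3 ih => exact ih

theorem pvReachB_iff {g m n h} (hm : 1 ≤ m) (hn : 1 ≤ n) :
    pvReachB g m n h = true ↔ pvRch g m n h ((m : Int) - 1, (n : Int) - 1) := by
  unfold pvReachB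
  by_cases hlt : pvAt g 0 0 < h
  · rw [if_pos hlt]
    simp only [Bool.false_eq_true, false_iff]
    intro hr
    have hok := pvRch_ok_start hr
    simp only [pvOk, Bool.and_eq_true, decide_eq_true_eq] at hok
    omega
  · rw [if_neg hlt]
    have hstart : PySem.Set.add PySem.Set.empty ((0 : Int), (0 : Int)) = [((0 : Int), (0 : Int))] := by
      rfl
    rw [hstart]
    have hok0 : pvOk g m n h ((0 : Int), (0 : Int)) = true := by
      simp only [pvOk, pvValid, Bool.and_eq_true, decide_eq_true_eq]
      norm_num
      omega
    apply pvBLoop_iff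
    · refine ⟨?_, ?_, ?_, ?_, ?_⟩
      · intro c hc
        simpa using hc
      · intro c hc
        have : c = ((0 : Int), (0 : Int)) := by simpa using hc
        subst this
        exact ⟨hok0, .base hok0⟩
      · intro c hc hns
        have : c = ((0 : Int), (0 : Int)) := by simpa using hc
        subst this
        exact absurd (List.mem_cons_self ..) hns
      · exact List.nodup_singleton _
      · exact List.mem_singleton.mpr rfl
    · have := pvFree_le m n [((0 : Int), (0 : Int))]
      simp only [List.length_singleton]
      omega

theorem pvPathA_eq_reachB {g m n} (hm : 1 ≤ m) (hn : 1 ≤ n) (h : Int) :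
    pvPathExistsA g m n h = pvReachB g m n h := by
  have h1 := pvPathExistsA_iff (g := g) (h := h) hm hn
  have h2 := pvReachB_iff (g := g) (h := h) hm hn
  have h3 := pvConn_iff_rch (g := g) (m := m) (n := n) (h := h)
  cases hA : pvPathExistsA g m n h <;> cases hB : pvReachB g m n h
  · rfl
  · exfalso
    rw [hA] at h1
    rw [hB] at h2
    simpa using h1.mpr (h3.mpr (h2.mp rfl))
  · exfalso
    rw [hA] at h1
    rw [hB] at h2
    simpa using h2.mpr (h3.mp (h1.mp rfl))
  · rfl

-- monotonicity in the threshold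
theorem pvOk_mono {g m n} {h h' : Int} (hle : h ≤ h') {p} (hok : pvOk g m n h' p = true) :
    pvOk g m n h p = true := by
  simp only [pvOk, Bool.and_eq_true, decide_eq_true_eq] at hok ⊢
  exact ⟨hok.1, by omega⟩

theorem pvRch_mono {g m n} {h h' : Int} (hle : h ≤ h') {p} (hr : pvRch g m n h' p) :
    pvRch g m n h p := by
  induction hr with
  | base h1 => exact .base (pvOk_mono hle h1)
  | step p' q h1 h2 h3 ih => exact .step p' q ih h2 (pvOk_mono hle h3)

theorem pvReachB_mono {g m n} (hm : 1 ≤ m) (hn : 1 ≤ n) {h h' : Int} (hle : h ≤ h')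
    (hr : pvReachB g m n h' = true) : pvReachB g m n h = true := by
  rw [pvReachB_iff hm hn] at hr ⊢
  exact pvRch_mono hle hr

-- outer-loop lemmas
theorem pvBuildHeap_eq (g : List (List Int)) (m n : Nat) :
    pvBuildHeap g m n = PySem.Set.ofList (pvTrav g m n) := by
  unfold pvBuildHeap pvTrav
  rw [PySem.Set.ofList_eq_foldl, List.foldl_flatMap]
  have hfun : (fun (acc : List Int) (i : Nat) =>
      List.foldl PySem.Set.add acc ((List.range n).map (fun (j : Nat) => pvAt g (i : Int) (j : Int))))
      = (fun (acc : List Int) (i : Nat) => (List.range n).foldl (fun (acc2 : List Int) (j : Nat) =>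
          if acc2.contains (pvAt g (i : Int) (j : Int)) then acc2
          else acc2 ++ [pvAt g (i : Int) (j : Int)]) acc) := by
    funext acc i
    rw [List.foldl_map]
    have hin : (fun (x : List Int) (j : Nat) => PySem.Set.add x (pvAt g (i : Int) (j : Int)))
        = (fun (acc2 : List Int) (j : Nat) =>
            if acc2.contains (pvAt g (i : Int) (j : Int)) then acc2
            else acc2 ++ [pvAt g (i : Int) (j : Int)]) := by
      funext acc2 j
      simp [PySem.Set.add, PySem.Set.contains]
    rw [hin]
  rw [hfun]

theorem pvSorted_cons_min {l : List Int} {c : Int} (hnd : l.Nodup)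
    (hmin : PySem.List.min? l (fun x => x) = some c) :
    PySem.List.sorted l (fun x => x) false =
      c :: PySem.List.sorted (l.erase c) (fun x => x) false := by
  have hcmem : c ∈ l := PySem.List.min?_mem hmin
  have hcmin : ∀ y ∈ l, c ≤ y := PySem.List.min?_isMin hmin
  apply PySem.List.sorted_eq_of_perm_of_pairwise_lt
  · exact List.Perm.trans (List.Perm.cons c (PySem.List.sorted_perm _ _ _))
      (List.perm_cons_erase hcmem).symm
  · rw [List.pairwise_cons]
    constructor
    · intro x hx
      have hx' : x ∈ l.erase c := (PySem.List.mem_sorted _ _ _ x).mp hx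
      have hxl : x ∈ l := List.mem_of_mem_erase hx'
      have hxc : x ≠ c := (List.Nodup.mem_erase_iff hnd).mp hx' |>.1
      exact lt_of_le_of_ne (hcmin x hxl) (Ne.symm hxc)
    · have hle : List.Pairwise (fun a b => a ≤ b) (PySem.List.sorted (l.erase c) (fun x => x) false) :=
        PySem.List.sorted_pairwise _ _
      have hnd' : (PySem.List.sorted (l.erase c) (fun x => x) false).Nodup :=
        ((PySem.List.sorted_perm _ _ _).nodup_iff).mpr (List.Nodup.erase c hnd)
      exact (hle.and hnd').imp (fun hab => lt_of_le_of_ne hab.1 hab.2)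

theorem pvALoop_eq {g m n} : ∀ (fuel : Nat) (l : List Int), l.Nodup → l.length ≤ fuel →
    pvALoop g m n fuel l =
      (PySem.List.sorted l (fun x => x) false).find? (fun c => !pvPathExistsA g m n c) := by
  intro fuel
  induction fuel with
  | zero =>
    intro l hnd hlen
    have : l = [] := List.length_eq_zero_iff.mp (Nat.le_zero.mp hlen)
    subst this
    rfl
  | succ fuel ih =>
    intro l hnd hlen
    cases hl : PySem.List.min? l (fun x => x) with
    | none =>
      have : l = [] := (PySem.List.min?_eq_none_iff l _).mp hl
      subst this
      rfl
    | some c =>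
      have hcmem : c ∈ l := PySem.List.min?_mem hl
      rw [pvALoop]
      simp only [hl]
      rw [pvSorted_cons_min hnd hl]
      have hrem : (PySem.List.remove? l c).getD [] = l.erase c := by
        rw [PySem.List.remove?_eq_some_erase l c hcmem]
        rfl
      by_cases hp : pvPathExistsA g m n c = true
      · rw [if_pos hp, hrem]
        rw [List.find?_cons_of_neg (by simp [hp])]
        apply ih (l.erase c) (List.Nodup.erase c hnd)
        have h1 : (l.erase c).length = l.length - 1 := List.length_erase_of_mem hcmem
        have h2 : 0 < l.length := List.length_pos_of_mem hcmem
        omega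
      · rw [if_neg hp]
        rw [List.find?_cons_of_pos (by simp [hp])]

theorem pvBSearch_props {g m n} (hs : List Int)
    (mono : ∀ i j : Nat, i ≤ j → j < hs.length →
      pvReachB g m n (hs.getD j 0) = true → pvReachB g m n (hs.getD i 0) = true) :
    ∀ (fuel lo hi : Nat), lo ≤ hi → hi ≤ hs.length → hi - lo ≤ fuel →
    (∀ i < lo, pvReachB g m n (hs.getD i 0) = true) →
    (hi < hs.length → pvReachB g m n (hs.getD hi 0) = false) →
    (∀ i < pvBSearch g m n hs fuel lo hi, pvReachB g m n (hs.getD i 0) = true) ∧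
    (pvBSearch g m n hs fuel lo hi < hs.length →
      pvReachB g m n (hs.getD (pvBSearch g m n hs fuel lo hi) 0) = false) ∧
    pvBSearch g m n hs fuel lo hi ≤ hs.length := by
  intro fuel
  induction fuel with
  | zero =>
    intro lo hi h1 h2 h3 h4 h5
    have hlh : lo = hi := by omega
    subst hlh
    exact ⟨h4, fun hlt => h5 hlt, h2⟩
  | succ fuel ih =>
    intro lo hi h1 h2 h3 h4 h5
    rw [pvBSearch]
    by_cases hlh : lo < hi
    · rw [if_pos hlh]
      have hm1 : lo ≤ (lo + hi) / 2 := by omega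
      have hm2 : (lo + hi) / 2 < hi := by omega
      by_cases hr : pvReachB g m n (hs.getD ((lo + hi) / 2) 0) = true
      · rw [if_pos hr]
        apply ih ((lo + hi) / 2 + 1) hi (by omega) h2 (by omega) ?_ h5
        intro i hi'
        exact mono i ((lo + hi) / 2) (by omega) (by omega) hr
      · rw [if_neg hr]
        apply ih lo ((lo + hi) / 2) (by omega) (by omega) (by omega) h4
        intro _
        exact Bool.eq_false_iff.mpr hr
    · rw [if_neg hlh]
      have hlh' : lo = hi := by omega
      subst hlh'
      exact ⟨h4, fun hlt => h5 hlt, h2⟩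

theorem pvFind?_first {α : Type} (d : α) (p : α → Bool) :
    ∀ (l : List α) (r : Nat), r ≤ l.length →
    (∀ i, i < r → p (l.getD i d) = false) →
    (r < l.length → p (l.getD r d) = true) →
    l.find? p = if r < l.length then some (l.getD r d) else none := by
  intro l
  induction l with
  | nil =>
    intro r hr _ _
    simp
  | cons a l' ih =>
    intro r hr h1 h2
    cases r with
    | zero =>
      have hpa : p a = true := by simpa using h2 (by simp)
      rw [List.find?_cons_of_pos hpa]
      simp
    | succ r' =>
      have hpa : p a = false := by simpa using h1 0 (Nat.succ_pos r')
      rw [List.find?_cons_of_neg (by simp [hpa])]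
      rw [ih r' (by simpa using hr) (fun i hi' => by simpa using h1 (i + 1) (by omega))
        (fun hlt => by simpa using h2 (by simpa using hlt))]
      simp only [List.length_cons]
      by_cases hrl : r' < l'.length
      · rw [if_pos hrl, if_pos (by omega)]
        simp
      · rw [if_neg hrl, if_neg (by omega)]

-- ===== VERDICT (by name: the statement is the Claim_ definition above) =====
theorem get_min_height_spec : Claim_equal_get_min_height := by
  intro grid _ hpre
  unfold Spec_get_min_height
  obtain ⟨hne, _⟩ := hpre
  show get_min_height grid = get_min_height_alt grid
  unfold get_min_height get_min_height_alt
  have hm1 : 1 ≤ grid.length := List.length_pos_of_ne_nil hne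
  show pvALoop grid grid.length (grid.getD 0 []).length
      (pvBuildHeap grid grid.length (grid.getD 0 []).length).length
      (pvBuildHeap grid grid.length (grid.getD 0 []).length)
    = (if pvBSearch grid grid.length (grid.getD 0 []).length
          (PySem.List.sorted (PySem.Set.ofList
            (pvTrav grid grid.length (grid.getD 0 []).length)) (fun x => x) false)
          ((PySem.List.sorted (PySem.Set.ofList
            (pvTrav grid grid.length (grid.getD 0 []).length)) (fun x => x) false).length + 1) 0
          ((PySem.List.sorted (PySem.Set.ofList
            (pvTrav grid grid.length (grid.getD 0 []).length)) (fun x => x) false).length)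
        < (PySem.List.sorted (PySem.Set.ofList
            (pvTrav grid grid.length (grid.getD 0 []).length)) (fun x => x) false).length
      then some ((PySem.List.sorted (PySem.Set.ofList
            (pvTrav grid grid.length (grid.getD 0 []).length)) (fun x => x) false).getD
          (pvBSearch grid grid.length (grid.getD 0 []).length
            (PySem.List.sorted (PySem.Set.ofList
              (pvTrav grid grid.length (grid.getD 0 []).length)) (fun x => x) false)
            ((PySem.List.sorted (PySem.Set.ofList
              (pvTrav grid grid.length (grid.getD 0 []).length)) (fun x => x) false).length + 1) 0
            ((PySem.List.sorted (PySem.Set.ofList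
              (pvTrav grid grid.length (grid.getD 0 []).length)) (fun x => x) false).length)) 0)
      else none)
  rw [pvBuildHeap_eq]
  rw [pvALoop_eq _ (PySem.Set.ofList (pvTrav grid grid.length (grid.getD 0 []).length))
    (PySem.Set.nodup_ofList _) (le_refl _)]
  by_cases hn0 : (grid.getD 0 []).length = 0
  · rw [hn0]
    have htrav : pvTrav grid grid.length 0 = [] := by
      simp [pvTrav]
    rw [htrav]
    rfl
  · have hn1 : 1 ≤ (grid.getD 0 []).length := by omega
    have hfun : (fun c => !pvPathExistsA grid grid.length (grid.getD 0 []).length c)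
        = (fun c => !pvReachB grid grid.length (grid.getD 0 []).length c) :=
      funext fun c => by rw [pvPathA_eq_reachB hm1 hn1]
    rw [hfun]
    set hs := PySem.List.sorted
      (PySem.Set.ofList (pvTrav grid grid.length (grid.getD 0 []).length)) (fun x => x) false
      with hhs
    have hpw : hs.Pairwise (· < ·) := PySem.List.sorted_ofList_pairwise_lt _
    have hmono : ∀ i j : Nat, i ≤ j → j < hs.length →
        pvReachB grid grid.length (grid.getD 0 []).length (hs.getD j 0) = true →
        pvReachB grid grid.length (grid.getD 0 []).length (hs.getD i 0) = true := by
      intro i j hij hj hr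
      have hij' : hs.getD i 0 ≤ hs.getD j 0 := by
        rcases Nat.eq_or_lt_of_le hij with rfl | hlt
        · exact le_refl _
        · have hi : i < hs.length := lt_trans hlt hj
          have := List.pairwise_iff_getElem.mp hpw i j hi hj hlt
          rw [List.getD_eq_getElem _ _ hi, List.getD_eq_getElem _ _ hj]
          exact le_of_lt this
      exact pvReachB_mono hm1 hn1 hij' hr
    obtain ⟨hA, hB, hC⟩ := pvBSearch_props hs hmono (hs.length + 1) 0 hs.length (Nat.zero_le _)
      (le_refl _) (by omega) (fun i hi => absurd hi (Nat.not_lt_zero i))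
      (fun hlt => absurd hlt (lt_irrefl _))
    rw [pvFind?_first (0 : Int) (fun c => !pvReachB grid grid.length (grid.getD 0 []).length c)
      hs (pvBSearch grid grid.length (grid.getD 0 []).length hs (hs.length + 1) 0 hs.length)
      hC (fun i hi => by simp only [Bool.not_eq_false']; exact hA i hi) (fun hlt => by simp only [Bool.not_eq_true']; exact hB hlt)]
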